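-- pv_equiv track=rewrite | github.com/dineshpanchananam/EPIJudge | epi_judge_python/is_string_in_matrix.py | is_pattern_contained_in_grid
-- ===== SOURCE A (Python) =====
-- from typing import List
-- from functools import lru_cache
--
-- def is_pattern_contained_in_grid(grid: List[List[int]],
--                                  pattern: List[int]) -> bool:
--   @lru_cache
--   def search(a, b, c):
--     if c == p:
--       return True
--     if a >= m or a < 0 or b >= n or b < 0:
--       return False
--     key = f"{a}-{b}-{c}"
--     visited.add(key)
--     found = False
--     if grid[a][b] == pattern[c]:
--       for x, y in ((a-1, b), (a+1, b), (a, b-1), (a, b+1)):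
--         if found: break
--         found = search(x, y, c+1)
--
--     visited.remove(key)
--     return found
--
--   fnd = False
--   m, n = len(grid), len(grid[0])
--   p = len(pattern)
--   visited = set()
--   for i in range(m):
--     for j in range(n):
--       if fnd: break
--       fnd = search(i, j, 0)
--   return fnd
-- ===== SOURCE B (Python) =====
-- from typing import List
--
--
-- def is_pattern_contained_in_grid(grid: List[List[int]],
--                                  pattern: List[int]) -> bool:
--   m, n = len(grid), len(grid[0])
--   p = len(pattern)
--   # reach[a][b] == "pattern[c:] matches a 4-directional path starting at (a,b)"
--   reach = [[True] * n for _ in range(m)]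
--   for c in range(p - 1, -1, -1):
--     last = (c == p - 1)
--     reach = [[grid[a][b] == pattern[c]
--               and (last or any(reach[x][y]
--                                for x, y in ((a - 1, b), (a + 1, b),
--                                             (a, b - 1), (a, b + 1))
--                                if 0 <= x < m and 0 <= y < n))
--               for b in range(n)] for a in range(m)]
--   return any(any(row) for row in reach)
-- ===== Notes on version B (the rewrite author's own statement) =====
-- stated objective: alternative
-- what changed: Replaces A's memoized top-down recursive DFS over (row, col, pattern-index) by a bottom-up iterative DP over the pattern index that rebuilds one boolean reachability table per pattern position; it trades A's early exit on a found match for always doing p table passes.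
-- outside the precondition, e.g. on is_pattern_contained_in_grid([[1, 2], [3]], [2]): A returns True, B raises IndexError
import Mathlib
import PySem

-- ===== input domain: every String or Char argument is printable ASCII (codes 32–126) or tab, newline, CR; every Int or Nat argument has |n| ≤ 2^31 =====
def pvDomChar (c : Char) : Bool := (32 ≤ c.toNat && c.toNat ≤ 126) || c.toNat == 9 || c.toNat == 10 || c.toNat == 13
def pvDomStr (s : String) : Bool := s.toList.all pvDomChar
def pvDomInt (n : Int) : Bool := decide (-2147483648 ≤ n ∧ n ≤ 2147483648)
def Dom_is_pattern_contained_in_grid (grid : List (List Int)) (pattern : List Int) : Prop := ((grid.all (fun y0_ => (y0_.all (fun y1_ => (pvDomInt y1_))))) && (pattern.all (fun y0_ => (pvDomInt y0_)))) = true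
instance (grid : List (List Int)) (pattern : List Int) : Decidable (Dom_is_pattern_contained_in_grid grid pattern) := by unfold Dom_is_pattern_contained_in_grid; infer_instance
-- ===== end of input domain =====

-- B replaces A's memoized top-down recursive search by a bottom-up iterative DP
-- over the pattern index (objective: alternative decomposition; return value only).

-- ===== PORT A =====
-- grid[a][b] under the in-bounds checks both programs perform (the default is never read in-bounds)
def pvCell (grid : List (List Int)) (a b : Int) : Int :=
  PySem.List.pyGetD (PySem.List.pyGetD grid a []) b 0

-- A's inner `search(a, b, c)`; `visited` and the lru_cache do not affect the value
-- (the function is pure in (a,b,c)), so they are omitted. `fuel` only makes the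
-- recursion total: A always calls with fuel = p ≥ p - c, so fuel never runs out.
def searchA (grid : List (List Int)) (pattern : List Int) (m n : Int) (p : Nat)
    (fuel : Nat) (a b : Int) (c : Nat) : Bool :=
  if c = p then true
  else if m ≤ a ∨ a < 0 ∨ n ≤ b ∨ b < 0 then false
  else match fuel with
  | 0 => false
  | Nat.succ fuel' =>
    if pvCell grid a b = PySem.List.pyGetD pattern (c : Int) 0 then
      searchA grid pattern m n p fuel' (a-1) b (c+1) ||
      searchA grid pattern m n p fuel' (a+1) b (c+1) ||
      searchA grid pattern m n p fuel' a (b-1) (c+1) ||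
      searchA grid pattern m n p fuel' a (b+1) (c+1)
    else false

def is_pattern_contained_in_grid (grid : List (List Int)) (pattern : List Int) : Bool :=
  match PySem.List.pyGet? grid 0 with
  | none => false   -- Python raises IndexError on len(grid[0]); excluded by Pre_
  | some row0 =>
    let m : Int := grid.length
    let n : Int := row0.length
    let p : Nat := pattern.length
    (PySem.List.pyRange 0 m 1).foldl (fun fnd i =>
      (PySem.List.pyRange 0 n 1).foldl (fun fnd j =>
        if fnd then fnd else searchA grid pattern m n p p i j 0) fnd) false

-- ===== PORT B =====
def pvNbrs (a b : Int) : List (Int × Int) := [(a-1, b), (a+1, b), (a, b-1), (a, b+1)]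

def pvGetB (t : List (List Bool)) (x y : Int) : Bool :=
  PySem.List.pyGetD (PySem.List.pyGetD t x []) y false

-- the body of B's nested comprehension, as a named helper
def pvAltCell (grid : List (List Int)) (pattern : List Int) (m n p c : Int)
    (reach : List (List Bool)) (a b : Int) : Bool :=
  decide (pvCell grid a b = PySem.List.pyGetD pattern c 0) &&
  (decide (c = p - 1) || (pvNbrs a b).any (fun xy =>
    decide (0 ≤ xy.1 ∧ xy.1 < m ∧ 0 ≤ xy.2 ∧ xy.2 < n) && pvGetB reach xy.1 xy.2))

def pvAltStep (grid : List (List Int)) (pattern : List Int) (m n p : Int)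
    (reach : List (List Bool)) (c : Int) : List (List Bool) :=
  (PySem.List.pyRange 0 m 1).map (fun a =>
    (PySem.List.pyRange 0 n 1).map (pvAltCell grid pattern m n p c reach a))

def pvInit (m n : Int) : List (List Bool) :=
  (PySem.List.pyRange 0 m 1).map (fun _ => List.replicate n.toNat true)

def is_pattern_contained_in_grid_alt (grid : List (List Int)) (pattern : List Int) : Bool :=
  match PySem.List.pyGet? grid 0 with
  | none => false   -- Python raises IndexError on len(grid[0]); excluded by Pre_
  | some row0 =>
    let m : Int := grid.length
    let n : Int := row0.length
    let p : Int := pattern.length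
    let final := (PySem.List.pyRange (p - 1) (-1) (-1)).foldl
      (pvAltStep grid pattern m n p) (pvInit m n)
    final.any (fun row => row.any (fun x => x))

-- ===== PRECONDITION & SPEC =====
-- Pre_ excludes the empty grid, on which A raises IndexError at len(grid[0]), and
-- ragged grids with a row shorter than the first, on which grid[a][b] can raise
-- IndexError in either program (A may also return before reaching the short row).
def Pre_is_pattern_contained_in_grid (grid : List (List Int)) (pattern : List Int) : Prop :=
  grid ≠ [] ∧ ∀ row ∈ grid, grid.headI.length ≤ row.length

instance (grid : List (List Int)) (pattern : List Int) : Decidable (Pre_is_pattern_contained_in_grid grid pattern) := by unfold Pre_is_pattern_contained_in_grid; infer_instance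

def pvWitness_is_pattern_contained_in_grid : List (List Int) × List Int :=
  ([[1, 2], [3, 4]], [1, 2, 4])

def Spec_is_pattern_contained_in_grid (grid : List (List Int)) (pattern : List Int) (out : Bool) : Prop := out = is_pattern_contained_in_grid_alt grid pattern
instance (grid : List (List Int)) (pattern : List Int) (out : Bool) : Decidable (Spec_is_pattern_contained_in_grid grid pattern out) := by unfold Spec_is_pattern_contained_in_grid; infer_instance

-- ===== CLAIM (what is proved, stated in full; the proofs are below) =====
def Claim_equal_is_pattern_contained_in_grid : Prop := ∀ (grid : List (List Int)) (pattern : List Int), Dom_is_pattern_contained_in_grid grid pattern → Pre_is_pattern_contained_in_grid grid pattern → Spec_is_pattern_contained_in_grid grid pattern (is_pattern_contained_in_grid grid pattern)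

-- ===== LEMMAS AND PROOFS =====

-- proof-side: the DP table after B's fold has processed levels p-1, …, c
def pvTbl (grid : List (List Int)) (pattern : List Int) (m n : Int) (p : Nat) (c : Nat) : List (List Bool) :=
  if h : c < p then
    pvAltStep grid pattern m n (p : Int) (pvTbl grid pattern m n p (c+1)) (c : Int)
  else pvInit m n
termination_by p - c
decreasing_by omega

lemma pvInit_eq_mk (m n : Int) :
    pvInit m n = (PySem.List.pyRange 0 m 1).map (fun _ =>
      (PySem.List.pyRange 0 n 1).map (fun _ => true)) := by
  unfold pvInit
  congr 1
  funext _
  exact (List.eq_replicate_iff.2 ⟨by simp [PySem.List.length_pyRange_one], by simp⟩).symm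

lemma pvGetB_mk (m n : Int) (h : Int → Int → Bool) (a b : Int)
    (ha0 : 0 ≤ a) (ham : a < m) (hb0 : 0 ≤ b) (hbn : b < n) :
    pvGetB ((PySem.List.pyRange 0 m 1).map (fun a => (PySem.List.pyRange 0 n 1).map (h a))) a b
      = h a b := by
  unfold pvGetB
  rw [PySem.List.pyGetD_map_pyRange_of_nonneg _ _ _ _ ha0 ham,
      PySem.List.pyGetD_map_pyRange_of_nonneg _ _ _ _ hb0 hbn]

lemma foldl_desc (grid : List (List Int)) (pattern : List Int) (m n : Int) (p : Nat) :
    ∀ c : Nat, c ≤ p →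
      (PySem.List.pyRange ((c : Int) - 1) (-1) (-1)).foldl
        (pvAltStep grid pattern m n (p : Int)) (pvTbl grid pattern m n p c)
      = pvTbl grid pattern m n p 0 := by
  intro c
  induction c with
  | zero =>
    intro _
    rw [show ((0 : Nat) : Int) - 1 = -1 by norm_num,
        PySem.List.pyRange_neg_one_eq_nil (le_refl _)]
    rfl
  | succ c ih =>
    intro hc
    have hstep : pvAltStep grid pattern m n (p : Int) (pvTbl grid pattern m n p (c+1)) (c : Int)
        = pvTbl grid pattern m n p c := by
      conv_rhs => rw [pvTbl]
      rw [dif_pos (show c < p by omega)]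
    rw [show ((c + 1 : Nat) : Int) - 1 = (c : Int) by push_cast; ring,
        PySem.List.pyRange_neg_one_cons (by omega : (-1 : Int) < (c : Int)),
        List.foldl_cons, hstep]
    exact ih (by omega)

lemma search_at_p (grid : List (List Int)) (pattern : List Int) (m n : Int) (p fuel : Nat)
    (a b : Int) : searchA grid pattern m n p fuel a b p = true := by
  rw [searchA.eq_def]; simp

lemma tbl_eq_search (grid : List (List Int)) (pattern : List Int) (m n : Int) (p : Nat) :
    ∀ (fuel c : Nat) (a b : Int), c ≤ p → p - c ≤ fuel →
      0 ≤ a → a < m → 0 ≤ b → b < n →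
      pvGetB (pvTbl grid pattern m n p c) a b = searchA grid pattern m n p fuel a b c := by
  intro fuel
  induction fuel with
  | zero =>
    intro c a b hc hf ha0 ham hb0 hbn
    have hcp : c = p := by omega
    subst hcp
    rw [search_at_p, pvTbl]
    simp only [lt_irrefl, dif_neg, not_false_iff]
    rw [pvInit_eq_mk, pvGetB_mk m n (fun _ _ => true) a b ha0 ham hb0 hbn]
  | succ fuel ih =>
    intro c a b hc hf ha0 ham hb0 hbn
    by_cases hcp : c = p
    · subst hcp
      rw [search_at_p, pvTbl]
      simp only [lt_irrefl, dif_neg, not_false_iff]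
      rw [pvInit_eq_mk, pvGetB_mk m n (fun _ _ => true) a b ha0 ham hb0 hbn]
    · have hclt : c < p := by omega
      rw [pvTbl]
      simp only [hclt, dif_pos]
      unfold pvAltStep
      rw [pvGetB_mk m n (pvAltCell grid pattern m n (p : Int) (c : Int)
            (pvTbl grid pattern m n p (c+1))) a b ha0 ham hb0 hbn]
      unfold pvAltCell
      rw [searchA.eq_def]
      simp only [hcp, if_false]
      have hbounds : ¬ (m ≤ a ∨ a < 0 ∨ n ≤ b ∨ b < 0) := by omega
      rw [if_neg hbounds]
      by_cases hmatch : pvCell grid a b = PySem.List.pyGetD pattern (c : Int) 0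
      · simp only [hmatch, decide_true, if_pos, Bool.true_and]
        by_cases hlast : c + 1 = p
        · have : (c : Int) = (p : Int) - 1 := by omega
          simp only [this, decide_true, Bool.true_or]
          have e1 := search_at_p grid pattern m n p fuel (a-1) b
          have e2 := search_at_p grid pattern m n p fuel (a+1) b
          have e3 := search_at_p grid pattern m n p fuel a (b-1)
          have e4 := search_at_p grid pattern m n p fuel a (b+1)
          rw [show c + 1 = p from hlast] at *
          rw [e1, e2, e3, e4]
          simp
        · have hne : ¬ ((c : Int) = (p : Int) - 1) := by omega
          simp only [hne, decide_false, Bool.false_or]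
          have key : ∀ x y : Int,
              (decide (0 ≤ x ∧ x < m ∧ 0 ≤ y ∧ y < n) &&
                pvGetB (pvTbl grid pattern m n p (c+1)) x y)
              = searchA grid pattern m n p fuel x y (c+1) := by
            intro x y
            by_cases hin : 0 ≤ x ∧ x < m ∧ 0 ≤ y ∧ y < n
            · rw [ih (c+1) x y (by omega) (by omega) hin.1 hin.2.1 hin.2.2.1 hin.2.2.2]
              simp [hin]
            · have hout : m ≤ x ∨ x < 0 ∨ n ≤ y ∨ y < 0 := by omega
              rw [searchA.eq_def]
              simp [hin, hout, show c + 1 ≠ p by omega]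
          simp only [pvNbrs, List.any_cons, List.any_nil]
          rw [key (a-1) b, key (a+1) b, key a (b-1), key a (b+1)]
          simp [Bool.or_assoc]
      · rw [if_neg hmatch, decide_eq_false hmatch]
        simp

lemma foldl_if_any (g : Int → Bool) :
    ∀ (L : List Int) (s : Bool),
      L.foldl (fun fnd j => if fnd then fnd else g j) s = (s || L.any g) := by
  intro L
  induction L with
  | nil => intro s; simp
  | cons j L ih =>
    intro s
    rw [List.foldl_cons, ih]
    cases s <;> simp

lemma foldl_or (g : Int → Bool) :
    ∀ (L : List Int) (s : Bool),
      L.foldl (fun fnd j => fnd || g j) s = (s || L.any g) := by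
  intro L
  induction L with
  | nil => intro s; simp
  | cons j L ih =>
    intro s
    rw [List.foldl_cons, ih]
    cases s <;> simp

lemma any2_congr (m n : Int) (f g : Int → Int → Bool)
    (h : ∀ a b, 0 ≤ a → a < m → 0 ≤ b → b < n → f a b = g a b) :
    (PySem.List.pyRange 0 m 1).any (fun a => (PySem.List.pyRange 0 n 1).any (f a))
      = (PySem.List.pyRange 0 m 1).any (fun a => (PySem.List.pyRange 0 n 1).any (g a)) := by
  rw [Bool.eq_iff_iff]
  simp only [List.any_eq_true, PySem.List.mem_pyRange_one]
  constructor
  · rintro ⟨a, ⟨ha1, ha2⟩, b, ⟨hb1, hb2⟩, hv⟩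
    exact ⟨a, ⟨ha1, ha2⟩, b, ⟨hb1, hb2⟩, by rw [← h a b ha1 ha2 hb1 hb2]; exact hv⟩
  · rintro ⟨a, ⟨ha1, ha2⟩, b, ⟨hb1, hb2⟩, hv⟩
    exact ⟨a, ⟨ha1, ha2⟩, b, ⟨hb1, hb2⟩, by rw [h a b ha1 ha2 hb1 hb2]; exact hv⟩

lemma any_mk (m n : Int) (h : Int → Int → Bool) :
    ((PySem.List.pyRange 0 m 1).map (fun a => (PySem.List.pyRange 0 n 1).map (h a))).any
        (fun row => row.any (fun x => x))
      = (PySem.List.pyRange 0 m 1).any (fun a => (PySem.List.pyRange 0 n 1).any (h a)) := by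
  simp [List.any_map, Function.comp_def]

lemma any_tbl (grid : List (List Int)) (pattern : List Int) (m n : Int) (p : Nat) (c : Nat) :
    (pvTbl grid pattern m n p c).any (fun row => row.any (fun x => x))
      = (PySem.List.pyRange 0 m 1).any (fun a => (PySem.List.pyRange 0 n 1).any
          (fun b => pvGetB (pvTbl grid pattern m n p c) a b)) := by
  rw [pvTbl]
  split
  case isTrue hlt =>
    unfold pvAltStep
    rw [any_mk]
    exact any2_congr m n _ _ (fun a b ha0 ham hb0 hbn =>
      (pvGetB_mk m n (pvAltCell grid pattern m n (p : Int) (c : Int)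
        (pvTbl grid pattern m n p (c+1))) a b ha0 ham hb0 hbn).symm)
  case isFalse hge =>
    rw [pvInit_eq_mk, any_mk]
    exact any2_congr m n _ _ (fun a b ha0 ham hb0 hbn =>
      (pvGetB_mk m n (fun _ _ => true) a b ha0 ham hb0 hbn).symm)

lemma pyGet0_of_ne_nil (grid : List (List Int)) (h : grid ≠ []) :
    PySem.List.pyGet? grid 0 = some grid.headI := by
  cases grid with
  | nil => exact absurd rfl h
  | cons r rs => simp [PySem.List.pyGet?, PySem.List.pyIdx?]

-- ===== VERDICT (by name: the statement is the Claim_ definition above) =====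
theorem is_pattern_contained_in_grid_spec : Claim_equal_is_pattern_contained_in_grid := by
  intro grid pattern _ hpre
  obtain ⟨hne, _⟩ := hpre
  unfold Spec_is_pattern_contained_in_grid
  unfold is_pattern_contained_in_grid is_pattern_contained_in_grid_alt
  rw [pyGet0_of_ne_nil grid hne]
  dsimp only
  set m : Int := (grid.length : Int) with hm
  set n : Int := (grid.headI.length : Int) with hn
  set p : Nat := pattern.length with hp
  -- B's fold computes pvTbl … 0
  have hinit : pvInit m n = pvTbl grid pattern m n p p := by
    rw [pvTbl]; simp
  rw [hinit, foldl_desc grid pattern m n p p (le_refl p), any_tbl]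
  -- A's double fold with break is an any-of-any
  simp only [foldl_if_any]
  rw [foldl_or]
  simp only [Bool.false_or]
  exact any2_congr m n _ _ (fun a b ha0 ham hb0 hbn =>
    (tbl_eq_search grid pattern m n p p 0 a b (by omega) (by omega) ha0 ham hb0 hbn).symm)
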